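-- pv_equiv track=rewrite | github.com/jkall/qgis-midvatten-plugin | tools/import_fieldlogger.py | sublocation_to_groups
-- ===== SOURCE A (Python) =====
-- def sublocation_to_groups(sublocations, delimiter='.'):
--     """
--     This method splits sublocation using a splitter, default to u'.'. Each list position is grouped to lists
--      containing all distinct values. It's finally stored in a dict with the lenght of the splitted group as key.
--     :param: sublocations: A list of sublocations, ex: ['c', 'a.1', 'a.2', 'b.1.1']
--     :return: a dict like {1: [set(distinct values)], 2: [set(distinct values)}, set(), set()], ...)
--     """
--     sublocation_groups = {}
--     for sublocation in sublocations:
--         splitted = sublocation.split(delimiter)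
--         length = len(splitted)
--         for index in range(length):
--             #a dict like {1: [set()], 2: [set(), set()], ...}
--             sublocation_groups.setdefault(length, [set()for i in range(length)])[index].add(splitted[index])
--     return sublocation_groups
-- ===== SOURCE B (Python) =====
-- def sublocation_to_groups(sublocations, delimiter='.'):
--     # Group-then-transpose: bucket split lists by length, then build the
--     # per-position distinct-value sets of each bucket with zip(*group).
--     buckets = {}
--     for sublocation in sublocations:
--         splitted = sublocation.split(delimiter)
--         buckets.setdefault(len(splitted), []).append(splitted)
--     return {length: [set(col) for col in zip(*group)]
--             for length, group in buckets.items()}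
-- ===== Notes on version B (the rewrite author's own statement) =====
-- stated objective: alternative
-- what changed: Replaces A's fused per-index accumulation (setdefault a list of sets and add each part inside a nested index loop) by two passes: bucket the split lists by length, then transpose each bucket with zip(*group) and take per-column sets.
-- outside the precondition, e.g. on sublocation_to_groups([], ''): A returns {}, B returns {}
import Mathlib
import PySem

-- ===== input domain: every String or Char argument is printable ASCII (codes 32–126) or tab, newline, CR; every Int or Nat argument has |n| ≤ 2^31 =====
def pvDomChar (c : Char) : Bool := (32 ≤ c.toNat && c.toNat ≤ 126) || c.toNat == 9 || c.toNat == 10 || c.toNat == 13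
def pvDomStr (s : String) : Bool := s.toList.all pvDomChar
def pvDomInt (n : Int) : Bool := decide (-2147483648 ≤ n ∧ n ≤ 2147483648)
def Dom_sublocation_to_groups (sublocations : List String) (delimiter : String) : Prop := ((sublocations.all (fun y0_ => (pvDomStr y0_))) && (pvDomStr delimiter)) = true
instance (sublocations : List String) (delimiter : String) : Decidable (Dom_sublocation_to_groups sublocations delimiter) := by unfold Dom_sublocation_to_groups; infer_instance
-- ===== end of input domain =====

-- B buckets the split lists by length and transposes each bucket, instead of A's fused
-- per-index accumulation; objective: alternative decomposition (same cost).

-- ===== PORT A =====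
def sublocation_to_groups (sublocations : List String) (delimiter : String) : List (Int × List (List String)) :=
  (sublocations.foldl (fun sublocation_groups sublocation =>
    let splitted := (PySem.Str.split? sublocation delimiter).getD []
    let length : Int := PySem.List.len splitted
    (PySem.List.pyRange 0 length 1).foldl (fun d index =>
      -- setdefault(length, [set() for i in range(length)])[index].add(splitted[index])
      -- mutates the set stored at d[length]; Dict.modify k dflt f is exactly d[k] = f(d.get(k, dflt))
      PySem.Dict.modify d length
        ((PySem.List.pyRange 0 length 1).map (fun _ => (PySem.Set.empty : PySem.Set String)))
        (fun sets => PySem.List.pySetD sets index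
          ((PySem.List.pyGetD sets index PySem.Set.empty).add (PySem.List.pyGetD splitted index ""))))
      sublocation_groups) PySem.Dict.empty).items

-- ===== PORT B =====
-- exact port of zip(*rows): columns up to the shortest row
def pvCols (rows : List (List String)) : Nat → List (List String)
  | 0 => []
  | n+1 => rows.map (fun r => r.headD "") :: pvCols (rows.map (fun r => r.tail)) n

def pvZipStar (rows : List (List String)) : List (List String) :=
  pvCols rows (((rows.map (fun r => r.length)).min?).getD 0)

def sublocation_to_groups_alt (sublocations : List String) (delimiter : String) : List (Int × List (List String)) :=
  let buckets := sublocations.foldl (fun b sublocation =>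
    let splitted := (PySem.Str.split? sublocation delimiter).getD []
    -- buckets.setdefault(len(splitted), []).append(splitted)
    PySem.Dict.modify b (PySem.List.len splitted) [] (fun g => g ++ [splitted])) PySem.Dict.empty
  buckets.items.map (fun lg => (lg.1, (pvZipStar lg.2).map (fun col => PySem.Set.ofList col)))

-- ===== PRECONDITION & SPEC =====
-- Pre_ excludes only delimiter = "": there Python's str.split raises ValueError on every
-- processed sublocation (with an empty sublocations list A trivially returns {} and B agrees).
def Pre_sublocation_to_groups (sublocations : List String) (delimiter : String) : Prop := delimiter ≠ ""
instance (sublocations : List String) (delimiter : String) : Decidable (Pre_sublocation_to_groups sublocations delimiter) := by unfold Pre_sublocation_to_groups; infer_instance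

def pvWitness_sublocation_to_groups : List String × String := (["c", "a.1", "a.2", "b.1.1"], ".")

def Spec_sublocation_to_groups (sublocations : List String) (delimiter : String) (out : List (Int × List (List String))) : Prop := out = sublocation_to_groups_alt sublocations delimiter
instance (sublocations : List String) (delimiter : String) (out : List (Int × List (List String))) : Decidable (Spec_sublocation_to_groups sublocations delimiter out) := by unfold Spec_sublocation_to_groups; infer_instance

-- ===== CLAIM (what is proved, stated in full; the proofs are below) =====
def Claim_equal_sublocation_to_groups : Prop := ∀ (sublocations : List String) (delimiter : String), Dom_sublocation_to_groups sublocations delimiter → Pre_sublocation_to_groups sublocations delimiter → Spec_sublocation_to_groups sublocations delimiter (sublocation_to_groups sublocations delimiter)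

-- ===== LEMMAS AND PROOFS =====

-- per-position distinct-value sets of a bucket, as B computes them
def pvColsSets (g : List (List String)) : List (PySem.Set String) :=
  (pvZipStar g).map (fun col => PySem.Set.ofList col)

-- B's final comprehension, applied to a bucket dictionary
def pvPost (d : PySem.Dict Int (List (List String))) : PySem.Dict Int (List (PySem.Set String)) :=
  ⟨d.items.map (fun lg => (lg.1, pvColsSets lg.2))⟩

-- every bucket is nonempty and holds rows whose length is its key
def pvWF (d : PySem.Dict Int (List (List String))) : Prop :=
  ∀ p ∈ d.items, p.2 ≠ [] ∧ ∀ r ∈ p.2, (r.length : Int) = p.1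

-- the body of A's outer loop, abbreviated
def pvStepA (delimiter : String) (d : PySem.Dict Int (List (PySem.Set String))) (sublocation : String) : PySem.Dict Int (List (PySem.Set String)) :=
  let splitted := (PySem.Str.split? sublocation delimiter).getD []
  let length : Int := PySem.List.len splitted
  (PySem.List.pyRange 0 length 1).foldl (fun d index =>
    PySem.Dict.modify d length
      ((PySem.List.pyRange 0 length 1).map (fun _ => (PySem.Set.empty : PySem.Set String)))
      (fun sets => PySem.List.pySetD sets index
        ((PySem.List.pyGetD sets index PySem.Set.empty).add (PySem.List.pyGetD splitted index "")))) d

-- the body of B's bucketing loop, abbreviated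
def pvStepB (delimiter : String) (b : PySem.Dict Int (List (List String))) (sublocation : String) : PySem.Dict Int (List (List String)) :=
  let splitted := (PySem.Str.split? sublocation delimiter).getD []
  PySem.Dict.modify b (PySem.List.len splitted) [] (fun g => g ++ [splitted])

-- str.split(sep) with sep ≠ '' never returns the empty list
theorem pv_go_ne_nil (sep : List Char) : ∀ (fuel : Nat) (l cur : List Char) (acc : List (List Char)),
    PySem.Chars.splitOn.go sep fuel l cur acc ≠ [] := by
  intro fuel
  induction fuel with
  | zero => intro l cur acc; simp [PySem.Chars.splitOn.go]
  | succ n ih =>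
    intro l cur acc
    cases l with
    | nil => simp [PySem.Chars.splitOn.go]
    | cons c rest =>
      rw [PySem.Chars.splitOn.go]
      split
      · exact ih _ _ _
      · exact ih _ _ _

theorem pv_split_ne_nil (x delim : String) (h : delim ≠ "") :
    (PySem.Str.split? x delim).getD [] ≠ [] := by
  have hsep : delim.toList ≠ [] := by simp_all
  simp [PySem.Str.split?, PySem.Chars.split?, List.isEmpty_iff, hsep, PySem.Chars.splitOn]
  exact pv_go_ne_nil _ _ _ _ _

-- a run of d[k] = f i (d[k]) updates, starting from a dict that has the key
theorem pv_foldl_modify_insert {ι ν : Type} (L : Int) (dflt : ν) (f : ι → ν → ν) (is : List ι) :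
    ∀ (d : PySem.Dict Int ν) (v : ν),
      is.foldl (fun d i => PySem.Dict.modify d L dflt (f i)) (d.insert L v)
        = d.insert L (is.foldl (fun v i => f i v) v) := by
  induction is with
  | nil => intro d v; simp
  | cons i is ih =>
    intro d v
    simp only [List.foldl_cons]
    have h1 : PySem.Dict.modify (d.insert L v) L dflt (f i) = d.insert L (f i v) := by
      simp [PySem.Dict.modify, PySem.Dict.getD_insert_self, PySem.Dict.insert_insert_self]
    rw [h1, ih]

theorem pv_foldl_modify_range {ν : Type} (L : Int) (dflt : ν) (g : Nat → ν → ν) (n : Nat) (hn : 0 < n)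
    (d : PySem.Dict Int ν) :
    (List.range n).foldl (fun d i => PySem.Dict.modify d L dflt (g i)) d
      = d.insert L ((List.range n).foldl (fun v i => g i v) (d.getD L dflt)) := by
  obtain ⟨m, rfl⟩ : ∃ m, n = m + 1 := ⟨n - 1, by omega⟩
  rw [List.range_succ_eq_map]
  simp only [List.foldl_cons, List.foldl_map]
  have h0 : PySem.Dict.modify d L dflt (g 0) = d.insert L (g 0 (d.getD L dflt)) := rfl
  rw [h0, pv_foldl_modify_insert L dflt (fun i => g (i + 1))]

-- the index loop over one split list is a positionwise zip with Set.add
theorem pv_range_fold_zip (s : List String) :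
    ∀ (n : Nat) (v : List (PySem.Set String)), v.length = s.length → n ≤ s.length →
      (List.range n).foldl (fun sets i => sets.set i ((sets.getD i PySem.Set.empty).add (s.getD i ""))) v
        = List.zipWith (fun st c => PySem.Set.add st c) (v.take n) (s.take n) ++ v.drop n := by
  intro n
  induction n with
  | zero => intro v hv _; simp
  | succ n ih =>
    intro v hv hn
    have hns : n < s.length := by omega
    have hnv : n < v.length := by omega
    rw [List.range_succ, List.foldl_append, ih v hv (by omega)]
    simp only [List.foldl_cons, List.foldl_nil]
    set Z := List.zipWith (fun st c => PySem.Set.add st c) (v.take n) (s.take n) with hZdef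
    have hZ : Z.length = n := by simp [hZdef, List.length_zipWith]; omega
    rw [List.drop_eq_getElem_cons hnv]
    have hget : (Z ++ v[n] :: List.drop (n+1) v).getD n PySem.Set.empty = v[n] := by
      rw [List.getD_eq_getElem _ _ (by simp [hZ]; omega)]
      rw [List.getElem_append_right (by omega)]
      simp [hZ]
    rw [hget, List.set_append, if_neg (by omega), hZ]
    simp only [Nat.sub_self, List.set_cons_zero]
    have h2 : List.take (n+1) v = List.take n v ++ [v[n]] := by
      rw [List.take_add_one]; simp [List.getElem?_eq_getElem hnv]
    have h3 : List.take (n+1) s = List.take n s ++ [s[n]] := by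
      rw [List.take_add_one]; simp [List.getElem?_eq_getElem hns]
    rw [h2, h3, List.zipWith_append (by simp; omega)]
    simp [List.getElem?_eq_getElem hns, List.append_assoc, hZdef]

theorem pv_stepA_eq (delim x : String) (hd : delim ≠ "") (d : PySem.Dict Int (List (PySem.Set String)))
    (hlen : (d.getD (((PySem.Str.split? x delim).getD []).length : Int)
              (List.replicate ((PySem.Str.split? x delim).getD []).length PySem.Set.empty)).length
            = ((PySem.Str.split? x delim).getD []).length) :
    pvStepA delim d x
      = d.insert (((PySem.Str.split? x delim).getD []).length : Int)
          (List.zipWith (fun st c => PySem.Set.add st c)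
            (d.getD (((PySem.Str.split? x delim).getD []).length : Int)
              (List.replicate ((PySem.Str.split? x delim).getD []).length PySem.Set.empty))
            ((PySem.Str.split? x delim).getD [])) := by
  have hsne : (PySem.Str.split? x delim).getD [] ≠ [] := pv_split_ne_nil x delim hd
  set s := (PySem.Str.split? x delim).getD [] with hs
  simp only [pvStepA, PySem.List.len_eq, ← hs]
  rw [PySem.List.pyRange_zero_natCast, List.foldl_map]
  have hfresh : ∀ (l : List Nat), List.map (fun _ => (PySem.Set.empty : PySem.Set String))
      (List.map (fun k : Nat => (k : Int)) l) = List.replicate l.length PySem.Set.empty := by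
    intro l; induction l with
    | nil => rfl
    | cons a t iht => simp_all [List.replicate_succ]
  rw [hfresh, List.length_range]
  simp only [PySem.List.pySetD_natCast, PySem.List.pyGetD_natCast]
  rw [pv_foldl_modify_range ((s.length : Nat) : Int) (List.replicate s.length PySem.Set.empty)
    (fun i sets => sets.set i ((sets.getD i PySem.Set.empty).add (s.getD i ""))) s.length
    (List.length_pos_of_ne_nil hsne) d]
  congr 1
  rw [pv_range_fold_zip s s.length _ hlen le_rfl]
  rw [List.take_of_length_le hlen.le, List.drop_of_length_le hlen.le, List.append_nil,
    List.take_length]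

theorem pv_len_pvCols : ∀ (n : Nat) (rows : List (List String)), (pvCols rows n).length = n := by
  intro n
  induction n with
  | zero => intro rows; rfl
  | succ n ih => intro rows; simp [pvCols, ih]

theorem pv_min_replicate (n : Nat) : ∀ (k : Nat), (List.replicate k n).foldl min n = n := by
  intro k
  induction k with
  | zero => rfl
  | succ k ih => simp [List.replicate_succ, ih]

theorem pv_zipstar_uniform (n : Nat) (g : List (List String)) (hne : g ≠ [])
    (hu : ∀ r ∈ g, r.length = n) : pvZipStar g = pvCols g n := by
  unfold pvZipStar
  have hmap : g.map (fun r => r.length) = List.replicate g.length n := by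
    rw [List.eq_replicate_iff]
    constructor
    · simp
    · intro b hb; simp at hb; obtain ⟨r, hr, rfl⟩ := hb; exact hu r hr
  rw [hmap]
  obtain ⟨r, rs, rfl⟩ : ∃ r rs, g = r :: rs := by
    cases g with
    | nil => exact absurd rfl hne
    | cons r rs => exact ⟨r, rs, rfl⟩
  simp only [List.length_cons, List.replicate_succ, List.min?_cons', Option.getD_some]
  rw [pv_min_replicate]

theorem pv_cols_append : ∀ (n : Nat) (s : List String) (rows : List (List String)), n ≤ s.length →
    pvCols (rows ++ [s]) n = List.zipWith (fun col c => col ++ [c]) (pvCols rows n) (s.take n) := by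
  intro n
  induction n with
  | zero => intros; simp [pvCols]
  | succ n ih =>
    intro s rows hns
    cases s with
    | nil => simp at hns
    | cons c s' =>
      simp only [pvCols, List.map_append, List.map_cons, List.map_nil, List.take_succ_cons,
        List.headD_cons, List.tail_cons]
      rw [ih s' (rows.map (fun r => r.tail)) (by simpa using hns)]
      simp only [List.zipWith_cons_cons]

theorem pv_cols_single : ∀ (n : Nat) (s : List String), n ≤ s.length →
    pvCols [s] n = (s.take n).map (fun c => [c]) := by
  intro n
  induction n with
  | zero => intros; rfl
  | succ n ih =>
    intro s hns
    cases s with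
    | nil => simp at hns
    | cons c s' =>
      simp only [pvCols, List.map_cons, List.map_nil, List.take_succ_cons, List.headD_cons,
        List.tail_cons]
      rw [ih s' (by simpa using hns)]

theorem pv_ofList_snoc (col : List String) (c : String) :
    PySem.Set.ofList (col ++ [c]) = (PySem.Set.ofList col).add c := by
  simp [PySem.Set.ofList, List.foldl_append]

theorem pv_colsSets_snoc (n : Nat) (g : List (List String)) (s : List String) (hne : g ≠ [])
    (hu : ∀ r ∈ g, r.length = n) (hs : s.length = n) :
    pvColsSets (g ++ [s]) = List.zipWith (fun st c => PySem.Set.add st c) (pvColsSets g) s := by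
  unfold pvColsSets
  rw [pv_zipstar_uniform n (g ++ [s]) (by simp)
      (by intro r hr; rcases List.mem_append.mp hr with h | h
          · exact hu r h
          · simp at h; subst h; exact hs),
    pv_zipstar_uniform n g hne hu, pv_cols_append n s g (le_of_eq hs.symm)]
  have hts : s.take n = s := by rw [← hs]; exact List.take_length ..
  rw [hts, List.map_zipWith, List.zipWith_map_left]
  have hfun : ∀ col cc, PySem.Set.ofList (col ++ [cc]) = (PySem.Set.ofList col).add cc := pv_ofList_snoc
  simp only [hfun]

theorem pv_zip_replicate : ∀ (s : List String),
    List.zipWith (fun st c => PySem.Set.add st c) (List.replicate s.length PySem.Set.empty) s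
      = s.map (fun c => PySem.Set.empty.add c) := by
  intro s
  induction s with
  | nil => rfl
  | cons c s' ih =>
    simp only [List.length_cons, List.replicate_succ, List.zipWith_cons_cons, List.map_cons]
    rw [ih]

theorem pv_colsSets_single (s : List String) :
    pvColsSets [s] = List.zipWith (fun st c => PySem.Set.add st c) (List.replicate s.length PySem.Set.empty) s := by
  unfold pvColsSets pvZipStar
  rw [pv_zip_replicate]
  simp only [List.map_cons, List.map_nil, List.min?_cons', List.foldl_nil, Option.getD_some]
  rw [pv_cols_single s.length s le_rfl, List.take_length]
  simp [PySem.Set.ofList, List.map_map, Function.comp]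

theorem pv_contains_post (d : PySem.Dict Int (List (List String))) (k : Int) :
    (pvPost d).contains k = d.contains k := by
  simp only [pvPost, PySem.Dict.contains, List.any_map]
  rfl

theorem pv_get?_post (d : PySem.Dict Int (List (List String))) (k : Int) :
    (pvPost d).get? k = (d.get? k).map (fun g => pvColsSets g) := by
  simp only [pvPost, PySem.Dict.get?, List.find?_map, Option.map_map]
  rfl

theorem pv_post_insert (d : PySem.Dict Int (List (List String))) (k : Int) (g : List (List String)) :
    pvPost (d.insert k g) = (pvPost d).insert k (pvColsSets g) := by
  by_cases hc : d.contains k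
  · simp only [PySem.Dict.insert, pv_contains_post, hc, if_true]
    simp only [pvPost, PySem.Dict.mk.injEq]
    rw [List.map_map, List.map_map]
    apply List.map_congr_left
    intro p hp
    by_cases hpk : (p.1 == k)
    · simp [Function.comp, hpk]
    · simp [Function.comp, hpk]
  · simp only [PySem.Dict.insert, pv_contains_post, hc, if_false, Bool.false_eq_true]
    simp [pvPost]

theorem pv_mem_insert {ν : Type} (d : PySem.Dict Int ν) (k : Int) (v : ν) (p : Int × ν)
    (hp : p ∈ (d.insert k v).items) : p = (k, v) ∨ p ∈ d.items := by
  unfold PySem.Dict.insert at hp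
  by_cases h : d.contains k
  · simp only [h, if_true] at hp
    obtain ⟨q, hq, heq⟩ := List.mem_map.mp hp
    by_cases hq1 : q.1 == k
    · left; rw [← heq]; simp [hq1]
    · right; rw [← heq]; simpa [hq1] using hq
  · simp [h] at hp
    rcases hp with hp | hp
    · right; exact hp
    · left; simp [hp]

theorem pv_get?_mem (d : PySem.Dict Int (List (List String))) (k : Int) (g : List (List String))
    (h : d.get? k = some g) : (k, g) ∈ d.items := by
  unfold PySem.Dict.get? at h
  cases hf : d.items.find? (fun p => p.1 == k) with
  | none => simp [hf] at h
  | some q =>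
    simp [hf] at h
    have hq1 : q.1 = k := by simpa using List.find?_some hf
    have := List.mem_of_find?_eq_some hf
    have : q = (k, g) := by cases q; simp_all
    subst this; assumption

theorem pv_wf_step (delim x : String) (d : PySem.Dict Int (List (List String))) (h : pvWF d) :
    pvWF (pvStepB delim d x) := by
  intro p hp
  unfold pvStepB PySem.Dict.modify at hp
  rcases pv_mem_insert _ _ _ _ hp with rfl | hin
  · refine ⟨by simp, ?_⟩
    intro r hr
    simp only [PySem.List.len_eq]
    rcases List.mem_append.mp hr with h1 | h1
    · cases hget : PySem.Dict.get? d (PySem.List.len ((PySem.Str.split? x delim).getD [])) with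
      | none => rw [PySem.Dict.getD, hget] at h1; simp at h1
      | some g0 =>
        rw [PySem.Dict.getD, hget] at h1; simp at h1
        have := (h _ (pv_get?_mem _ _ _ hget)).2 r h1
        simpa [PySem.List.len_eq] using this
    · simp at h1; subst h1; rfl
  · exact h p hin

theorem pv_step_commute (delim x : String) (hd : delim ≠ "") (d : PySem.Dict Int (List (List String)))
    (h : pvWF d) : pvStepA delim (pvPost d) x = pvPost (pvStepB delim d x) := by
  have hsne : (PySem.Str.split? x delim).getD [] ≠ [] := pv_split_ne_nil x delim hd
  set s := (PySem.Str.split? x delim).getD [] with hs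
  set n := s.length with hn
  have hstepB : pvStepB delim d x = d.insert (n : Int) (d.getD (n : Int) [] ++ [s]) := by
    simp only [pvStepB, PySem.Dict.modify, PySem.List.len_eq, ← hs, ← hn]
  rw [hstepB, pv_post_insert]
  cases hget : d.get? (n : Int) with
  | none =>
    have hbase : (pvPost d).getD (n : Int) (List.replicate n PySem.Set.empty)
        = List.replicate n PySem.Set.empty := by
      simp [PySem.Dict.getD, pv_get?_post, hget]
    have hlen : ((pvPost d).getD (n : Int) (List.replicate n PySem.Set.empty)).length = n := by
      rw [hbase]; simp
    rw [pv_stepA_eq delim x hd (pvPost d) hlen, hbase]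
    have hgD : d.getD (n : Int) [] = [] := by simp [PySem.Dict.getD, hget]
    rw [hgD]
    congr 1
    simp only [List.nil_append]
    rw [hn]
    exact (pv_colsSets_single s).symm
  | some g0 =>
    have hmem := pv_get?_mem d _ g0 hget
    obtain ⟨hgne, hrows⟩ := h _ hmem
    have hrows' : ∀ r ∈ g0, r.length = n := by
      intro r hr; have h' := hrows r hr; simp at h'; exact_mod_cast h' 
    have hbase : (pvPost d).getD (n : Int) (List.replicate n PySem.Set.empty) = pvColsSets g0 := by
      simp [PySem.Dict.getD, pv_get?_post, hget]
    have hlen : ((pvPost d).getD (n : Int) (List.replicate n PySem.Set.empty)).length = n := by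
      rw [hbase]; unfold pvColsSets
      rw [pv_zipstar_uniform n g0 hgne hrows']
      simp [pv_len_pvCols]
    rw [pv_stepA_eq delim x hd (pvPost d) hlen, hbase]
    have hgD : d.getD (n : Int) [] = g0 := by simp [PySem.Dict.getD, hget]
    rw [hgD]
    congr 1
    exact (pv_colsSets_snoc n g0 s hgne hrows' hn.symm).symm

theorem pv_fold_commute (delim : String) (hd : delim ≠ "") : ∀ (subs : List String) (d : PySem.Dict Int (List (List String))),
    pvWF d → subs.foldl (pvStepA delim) (pvPost d) = pvPost (subs.foldl (pvStepB delim) d) := by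
  intro subs
  induction subs with
  | nil => intro d _; rfl
  | cons x subs ih =>
    intro d hwf
    simp only [List.foldl_cons]
    rw [pv_step_commute delim x hd d hwf]
    exact ih _ (pv_wf_step delim x d hwf)

-- ===== VERDICT (by name: the statement is the Claim_ definition above) =====
theorem sublocation_to_groups_spec : Claim_equal_sublocation_to_groups := by
  intro subs delim _ hpre
  unfold Spec_sublocation_to_groups
  have hwf0 : pvWF PySem.Dict.empty := by intro p hp; simp [PySem.Dict.empty] at hp
  have h := pv_fold_commute delim hpre subs PySem.Dict.empty hwf0
  have hempty : pvPost PySem.Dict.empty = PySem.Dict.empty := rfl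
  rw [hempty] at h
  show (subs.foldl (pvStepA delim) PySem.Dict.empty).items
      = (pvPost (subs.foldl (pvStepB delim) PySem.Dict.empty)).items
  exact congrArg PySem.Dict.items h
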